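-- pv_equiv track=rewrite | github.com/Shubham92166/Data-Structures-and-Algorithm | String/detectCapital.py | detectCapital
-- ===== SOURCE A (Python) =====
-- def detectCapital(word):
--     flag=False
--     if(len(word)==1):
--         return True
--     if ord(word[0])>=65 and ord(word[0])<=90 and 65<=ord(word[1])<=90:
--         if(len(word)==2):
--             return True
--         for char in range(2, len(word)):
--             if 65<=ord(word[char])<=90:
--                 flag=True
--             else:
--                 flag=False
--                 break
--     elif(97<=ord(word[0])<=122 or 65<=ord(word[0])<=90):
--         for char in range(1, len(word)):
--             if(97<=ord(word[char])<=122):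
--                 flag=True
--             else:
--                 flag=False
--                 break
--     return flag
-- ===== SOURCE B (Python) =====
-- def detectCapital(word):
--     if len(word) == 1:
--         return True
--     first = ord(word[0])
--     n = len(word)
--     U = sum(1 for c in word if 65 <= ord(c) <= 90)
--     L = sum(1 for c in word if 97 <= ord(c) <= 122)
--     return U == n or L == n or (65 <= first <= 90 and U == 1 and L == n - 1)
-- ===== Notes on version B (the rewrite author's own statement) =====
-- stated objective: alternative
-- what changed: Replaces A's positional branch-and-early-break validation with one aggregate pass counting uppercase and lowercase letters, then a closed-form arithmetic predicate U==n or L==n or (first upper and U==1 and L==n-1).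
import Mathlib
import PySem

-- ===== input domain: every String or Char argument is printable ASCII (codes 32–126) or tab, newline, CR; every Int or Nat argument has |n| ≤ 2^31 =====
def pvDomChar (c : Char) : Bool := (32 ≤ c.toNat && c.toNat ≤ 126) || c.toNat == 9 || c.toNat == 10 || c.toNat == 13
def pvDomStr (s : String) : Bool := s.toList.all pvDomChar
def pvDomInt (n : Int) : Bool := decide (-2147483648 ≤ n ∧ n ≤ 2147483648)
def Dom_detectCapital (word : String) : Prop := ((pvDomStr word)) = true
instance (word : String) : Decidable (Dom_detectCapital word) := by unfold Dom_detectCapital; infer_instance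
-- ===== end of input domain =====

-- B replaces A's positional branch-and-early-break validation with aggregate
-- uppercase/lowercase counting and a closed-form predicate (objective: alternative).


-- ===== PORT A =====
-- the two ord-range tests A writes inline
def pvUp (c : Char) : Bool := 65 ≤ c.toNat && c.toNat ≤ 90
def pvLo (c : Char) : Bool := 97 ≤ c.toNat && c.toNat ≤ 122

-- A's `for char in range(2, len(word))` loop with its flag / break, step for step
def pvALoopUpper : List Char → Bool → Bool
  | [], flag => flag
  | c :: rest, _ => if pvUp c then pvALoopUpper rest true else false

-- A's `for char in range(1, len(word))` loop with its flag / break, step for step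
def pvALoopLower : List Char → Bool → Bool
  | [], flag => flag
  | c :: rest, _ => if pvLo c then pvALoopLower rest true else false

-- A's body on the character list; [] is the case where word[0] raises IndexError (excluded by Pre_)
def pvACore : List Char → Bool
  | [] => false
  | [_] => true                        -- len(word)==1
  | a :: b :: rest =>
    if pvUp a && pvUp b then           -- ord tests on word[0], word[1]
      if rest.length == 0 then true    -- len(word)==2
      else pvALoopUpper rest false
    else if pvLo a || pvUp a then pvALoopLower (b :: rest) false
    else false

def detectCapital (word : String) : Bool := pvACore word.toList

-- ===== PORT B =====
-- B's body on the character list; [] is the case where ord(word[0]) raises IndexError (excluded by Pre_)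
def pvBCore : List Char → Bool
  | [] => false
  | [_] => true                        -- len(word)==1
  | a :: b :: rest =>
    let cs := a :: b :: rest
    let n := cs.length
    let U := (cs.filter pvUp).length   -- sum(1 for c in word if 65<=ord(c)<=90)
    let L := (cs.filter pvLo).length   -- sum(1 for c in word if 97<=ord(c)<=122)
    U == n || L == n || (pvUp a && U == 1 && L == n - 1)

def detectCapital_alt (word : String) : Bool := pvBCore word.toList

-- ===== PRECONDITION & SPEC =====
-- Pre_ excludes only the empty string, on which both A and B raise IndexError.
def Pre_detectCapital (word : String) : Prop := word ≠ ""
instance (word : String) : Decidable (Pre_detectCapital word) := by unfold Pre_detectCapital; infer_instance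
def pvWitness_detectCapital : String := "Google"

def Spec_detectCapital (word : String) (out : Bool) : Prop := out = detectCapital_alt word
instance (word : String) (out : Bool) : Decidable (Spec_detectCapital word out) := by unfold Spec_detectCapital; infer_instance

-- ===== CLAIM (what is proved, stated in full; the proofs are below) =====
def Claim_equal_detectCapital : Prop := ∀ (word : String), Dom_detectCapital word → Pre_detectCapital word → Spec_detectCapital word (detectCapital word)

-- ===== LEMMAS AND PROOFS =====

theorem pvUp_lo_false (c : Char) (h : pvUp c = true) : pvLo c = false := by
  simp only [pvUp, Bool.and_eq_true, decide_eq_true_eq] at h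
  simp only [pvLo, Bool.and_eq_false_iff, decide_eq_false_iff_not]
  left; omega

theorem pvLo_up_false (c : Char) (h : pvLo c = true) : pvUp c = false := by
  simp only [pvLo, Bool.and_eq_true, decide_eq_true_eq] at h
  simp only [pvUp, Bool.and_eq_false_iff, decide_eq_false_iff_not]
  right; omega

theorem pvALoopUpper_true (l : List Char) : pvALoopUpper l true = l.all pvUp := by
  induction l with
  | nil => rfl
  | cons c rest ih =>
    simp only [pvALoopUpper, List.all_cons]
    by_cases h : pvUp c = true <;> simp [h, ih]

theorem pvALoopUpper_cons (c : Char) (rest : List Char) (f : Bool) :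
    pvALoopUpper (c :: rest) f = (c :: rest).all pvUp := by
  simp only [pvALoopUpper, List.all_cons]
  by_cases h : pvUp c = true <;> simp [h, pvALoopUpper_true]

theorem pvALoopLower_true (l : List Char) : pvALoopLower l true = l.all pvLo := by
  induction l with
  | nil => rfl
  | cons c rest ih =>
    simp only [pvALoopLower, List.all_cons]
    by_cases h : pvLo c = true <;> simp [h, ih]

theorem pvALoopLower_cons (c : Char) (rest : List Char) (f : Bool) :
    pvALoopLower (c :: rest) f = (c :: rest).all pvLo := by
  simp only [pvALoopLower, List.all_cons]
  by_cases h : pvLo c = true <;> simp [h, pvALoopLower_true]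

-- filter keeps everything iff `all`
theorem pvFilterLenEq {p : Char → Bool} (l : List Char) :
    ((l.filter p).length = l.length) ↔ l.all p = true := by
  induction l with
  | nil => simp
  | cons c rest ih =>
    have hle : (rest.filter p).length ≤ rest.length := List.length_filter_le _ _
    by_cases h : p c = true <;> simp [List.filter_cons, h, ← ih] <;> omega

theorem pvFilterLenZeroOfAllLo (l : List Char) (h : l.all pvLo = true) :
    (l.filter pvUp).length = 0 := by
  induction l with
  | nil => rfl
  | cons c rest ih =>
    simp only [List.all_cons, Bool.and_eq_true] at h
    simp [List.filter_cons, pvLo_up_false c h.1, ih h.2]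

-- core equivalence on a word of length ≥ 2
theorem pvMain (a b : Char) (rest : List Char) :
    pvACore (a :: b :: rest) = pvBCore (a :: b :: rest) := by
  have hUr : (rest.filter pvUp).length ≤ rest.length := List.length_filter_le _ _
  have hLrr : (rest.filter pvLo).length ≤ rest.length := List.length_filter_le _ _
  simp only [pvACore, pvBCore, List.filter_cons, List.length_cons]
  by_cases hA : pvUp a = true
  · by_cases hB : pvUp b = true
    · -- first two characters upper: A checks the tail is all upper, B checks U == n
      rw [hA, hB, pvUp_lo_false a hA, pvUp_lo_false b hB]
      simp only [Bool.and_self, if_true, Bool.false_eq_true, if_false]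
      have hAside : (if (rest.length == 0) = true then true else pvALoopUpper rest false)
          = rest.all pvUp := by
        match rest with
        | [] => simp
        | c :: r => simp [pvALoopUpper_cons]
      rw [hAside]
      by_cases hall : rest.all pvUp = true
      · have h0 := (pvFilterLenEq (p := pvUp) rest).mpr hall
        simp [hall, h0]
      · have hne : (rest.filter pvUp).length ≠ rest.length := fun h =>
          hall ((pvFilterLenEq (p := pvUp) rest).mp h)
        have hf : rest.all pvUp = false := by simpa using hall
        simp [hall, beq_iff_eq]
        exact ⟨by simpa [List.all_eq_false] using hf, by omega⟩
    · -- first upper, second not upper: A checks word[1:] all lower, B's U==1 ∧ L==n-1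
      rw [Bool.not_eq_true] at hB
      rw [hA, hB, pvUp_lo_false a hA]
      simp only [Bool.and_false, Bool.false_eq_true, if_false, Bool.or_true, if_true,
        pvALoopLower_cons, List.all_cons]
      by_cases hLB : pvLo b = true
      · rw [hLB]
        simp only [Bool.true_and, if_true]
        by_cases hallr : rest.all pvLo = true
        · have hL := (pvFilterLenEq (p := pvLo) rest).mpr hallr
          have hU := pvFilterLenZeroOfAllLo rest hallr
          simp [hallr, hL, hU]
        · have hne : (rest.filter pvLo).length ≠ rest.length := fun h =>
            hallr ((pvFilterLenEq (p := pvLo) rest).mp h)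
          have hf : rest.all pvLo = false := by simpa using hallr
          simp [hallr, beq_iff_eq]
          exact ⟨⟨by omega, by omega⟩, fun _ => by simpa [List.all_eq_false] using hf⟩
      · rw [Bool.not_eq_true] at hLB
        rw [hLB]
        simp [beq_iff_eq]
        omega
  · -- first character not upper: A runs the lowercase loop iff it is a letter
    rw [Bool.not_eq_true] at hA
    rw [hA]
    simp only [Bool.false_and, Bool.false_eq_true, if_false, Bool.or_false]
    by_cases hLA : pvLo a = true
    · -- first lower: A checks the tail all lower, B checks L == n
      rw [hLA]
      simp only [if_true, pvALoopLower_cons, List.all_cons]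
      by_cases hLB : pvLo b = true
      · rw [hLB, pvLo_up_false b hLB]
        simp only [Bool.true_and, if_true, Bool.false_eq_true, if_false]
        by_cases hallr : rest.all pvLo = true
        · have hL := (pvFilterLenEq (p := pvLo) rest).mpr hallr
          simp [hallr, hL]
        · have hne : (rest.filter pvLo).length ≠ rest.length := fun h =>
            hallr ((pvFilterLenEq (p := pvLo) rest).mp h)
          have hf : rest.all pvLo = false := by simpa using hallr
          simp [hallr, beq_iff_eq]
          exact ⟨by omega, by simpa [List.all_eq_false] using hf⟩
      · rw [Bool.not_eq_true] at hLB
        rw [hLB]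
        by_cases hUB : pvUp b = true
        · rw [hUB]
          simp [beq_iff_eq]
          omega
        · rw [Bool.not_eq_true] at hUB
          rw [hUB]
          simp [beq_iff_eq]
          omega
    · -- first character not a letter: both sides are false
      rw [Bool.not_eq_true] at hLA
      rw [hLA]
      simp only [Bool.false_eq_true, if_false]
      by_cases hUB : pvUp b = true
      · rw [hUB, pvUp_lo_false b hUB]
        simp [beq_iff_eq]
        omega
      · rw [Bool.not_eq_true] at hUB
        rw [hUB]
        by_cases hLB : pvLo b = true
        · rw [hLB]
          simp [beq_iff_eq]
          omega
        · rw [Bool.not_eq_true] at hLB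
          rw [hLB]
          simp [beq_iff_eq]
          omega

-- ===== VERDICT (by name: the statement is the Claim_ definition above) =====
theorem detectCapital_spec : Claim_equal_detectCapital := by
  intro word _ hpre
  unfold Spec_detectCapital detectCapital detectCapital_alt
  match hw : word.toList with
  | [] =>
    exact absurd (by simpa using congrArg String.ofList hw) hpre
  | [c] => rfl
  | a :: b :: rest => exact pvMain a b rest
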